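-- pv_equiv track=rewrite | github.com/atif-ghafoor/games_in_python | word_guessing_game.py | dashes
-- ===== SOURCE A (Python) =====
-- def dashes(ran):
--     r = ran
--     r_list = list(r)
--     r_len = len(r)
--     for i in range(1, r_len-1):
--         r_list[i] = '_'
--     r = ''.join(r_list)
--     return r
-- ===== SOURCE B (Python) =====
-- def dashes(ran):
--     n = len(ran)
--     if n <= 2:
--         return ran
--     return ran[:1] + '_' * (n - 2) + ran[-1:]
-- ===== Notes on version B (the rewrite author's own statement) =====
-- stated objective: faster
-- what changed: Replaces the per-index list-mutation loop plus join with a guarded closed-form concatenation: first character, an underscore repeated n-2 times, last character; bulk string repetition avoids the list conversion and per-element writes.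
import Mathlib
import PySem

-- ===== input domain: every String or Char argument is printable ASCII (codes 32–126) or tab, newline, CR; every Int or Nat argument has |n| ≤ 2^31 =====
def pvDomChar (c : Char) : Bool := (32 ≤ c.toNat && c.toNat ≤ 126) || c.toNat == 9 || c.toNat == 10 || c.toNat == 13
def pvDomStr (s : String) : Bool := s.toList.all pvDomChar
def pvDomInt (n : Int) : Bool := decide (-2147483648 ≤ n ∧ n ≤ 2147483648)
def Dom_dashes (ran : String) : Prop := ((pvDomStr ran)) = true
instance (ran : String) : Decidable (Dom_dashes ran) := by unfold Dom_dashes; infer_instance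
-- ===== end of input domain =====

-- B replaces A's per-index mutation loop with a guarded closed-form concatenation (idiomatic).

-- ===== PORT A =====
def dashes (ran : String) : String :=
  let rList := ran.toList
  let rLen : Int := PySem.Str.len ran
  let rList' := (PySem.List.pyRange 1 (rLen - 1) 1).foldl
    (fun acc i => PySem.List.pySetD acc i '_') rList
  String.ofList rList'

-- ===== PORT B =====
def dashes_alt (ran : String) : String :=
  let n : Int := PySem.Str.len ran
  if n ≤ 2 then ran
  else String.ofList (PySem.List.slice ran.toList none (some 1)
        ++ List.replicate (n - 2).toNat '_'
        ++ PySem.List.slice ran.toList (some (-1)) none)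

-- ===== PRECONDITION & SPEC =====
def Spec_dashes (ran : String) (out : String) : Prop := out = dashes_alt ran
instance (ran : String) (out : String) : Decidable (Spec_dashes ran out) := by unfold Spec_dashes; infer_instance

-- ===== CLAIM (what is proved, stated in full; the proofs are below) =====
def Claim_equal_dashes : Prop := ∀ (ran : String), Dom_dashes ran → Spec_dashes ran (dashes ran)

-- ===== LEMMAS AND PROOFS =====

-- setting interior indices 1..k of l yields head ++ underscores ++ tail
lemma foldl_set_range (l : List Char) (k : Nat) (h : 1 + k ≤ l.length) :
    (PySem.List.pyRange 1 (1 + (k : Int)) 1).foldl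
      (fun acc i => PySem.List.pySetD acc i '_') l
    = l.take 1 ++ List.replicate k '_' ++ l.drop (1 + k) := by
  induction k with
  | zero =>
      rw [PySem.List.pyRange_one_eq_nil (by omega)]
      simp only [List.foldl_nil, List.replicate_zero, List.append_nil]
      exact (List.take_append_drop 1 l).symm
  | succ k ih =>
      have h' : 1 + k ≤ l.length := by omega
      have hlt : 1 + k < l.length := by omega
      rw [show (1 + ((k + 1 : Nat) : Int)) = (1 + (k : Int)) + 1 by push_cast; ring]
      rw [PySem.List.pyRange_one_succ_right (by omega)]
      rw [List.foldl_append, ih h']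
      simp only [List.foldl_cons, List.foldl_nil]
      rw [show ((1 : Int) + (k : Int)) = ((1 + k : Nat) : Int) by push_cast; ring]
      rw [PySem.List.pySetD_natCast]
      have hP : (l.take 1 ++ List.replicate k '_').length = 1 + k := by
        simp [List.length_take]; omega
      rw [List.drop_eq_getElem_cons hlt]
      rw [List.set_append_right _ _ (by omega)]
      rw [hP]
      simp [List.replicate_succ', List.append_assoc]
      rw [List.drop_eq_getElem_cons hlt, List.set_cons_zero, Nat.add_assoc]

-- ===== VERDICT (by name: the statement is the Claim_ definition above) =====
theorem dashes_spec : Claim_equal_dashes := by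
  intro ran _
  unfold Spec_dashes dashes dashes_alt
  simp only [PySem.Str.len_eq]
  by_cases h2 : ((ran.toList.length : Int)) ≤ 2
  · rw [if_pos h2, PySem.List.pyRange_one_eq_nil (by omega)]
    simp only [List.foldl_nil]
    exact String.ofList_toList
  · rw [if_neg h2]
    have h3 : 3 ≤ ran.toList.length := by omega
    rw [show ((ran.toList.length : Int) - 1) = 1 + ((ran.toList.length - 2 : Nat) : Int) by
      omega]
    rw [foldl_set_range ran.toList (ran.toList.length - 2) (by omega)]
    rw [PySem.List.slice_from_neg_one]
    rw [show ((ran.toList.length : Int) - 2).toNat = ran.toList.length - 2 by omega]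
    rw [show (1 + (ran.toList.length - 2)) = ran.toList.length - 1 by omega,
      PySem.List.slice_to]
    all_goals norm_num
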